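-- pv_equiv track=rewrite | github.com/0rphee/JetBrains-Academy-Learning-projects | 03-Tic-Tac-Toe/Final code/tests2.py | obtain_actual_valid_coordinates
-- ===== SOURCE A (Python) =====
-- def linear_search(array, to_find):
--     for i in range(0, len(array)):
--         if array[i] == to_find:
--             return i
--     return -1
--
-- def obtain_actual_valid_coordinates(game, valid_coordinates):
--     # Tracks where's the last free space in the game given
--     av_space_index_in_valid_coordinates = 0
--     # Stores the indeces where there's no "X", nor "O"
--     available_spaces_indeces = []
--     while av_space_index_in_valid_coordinates != -1:
--         av_space_index_in_valid_coordinates = linear_search(game, " ")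
--         if av_space_index_in_valid_coordinates != -1:
--             available_spaces_indeces.append(av_space_index_in_valid_coordinates)
--             game[av_space_index_in_valid_coordinates] = "R"
--
--     # Var with the coordinates available to use in format [1, 1], as a list
--     ultimate_val_coordinates = []
--     for index in available_spaces_indeces:
--         ultimate_val_coordinates.append(valid_coordinates[index])
--
--     # Removes the free spaces from the original 9x9 available coordinates, to obtain
--     # a list with the occupied spaces
--     for coordinate in ultimate_val_coordinates:
--         valid_coordinates.remove(coordinate)
--     return ultimate_val_coordinates, valid_coordinates
-- ===== SOURCE B (Python) =====
-- def obtain_actual_valid_coordinates(game, valid_coordinates):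
--     # One forward pass over game: collect empty-cell indices and mark them "R".
--     available_spaces_indeces = []
--     for i, cell in enumerate(game):
--         if cell == " ":
--             available_spaces_indeces.append(i)
--             game[i] = "R"
--     ultimate_val_coordinates = [valid_coordinates[i] for i in available_spaces_indeces]
--     # Multiset of coordinates to drop, then one pass keeping the rest
--     # (drops the first c occurrences of each value, same as repeated .remove).
--     pending = {}
--     for coordinate in ultimate_val_coordinates:
--         key = tuple(coordinate)
--         pending[key] = pending.get(key, 0) + 1
--     remaining = []
--     for coordinate in valid_coordinates:
--         key = tuple(coordinate)
--         if pending.get(key, 0) > 0: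
--             pending[key] -= 1
--         else:
--             remaining.append(coordinate)
--     valid_coordinates[:] = remaining
--     return ultimate_val_coordinates, valid_coordinates
-- ===== Notes on version B (the rewrite author's own statement) =====
-- stated objective: alternative
-- what changed: A repeatedly linear-searches the board from the start for each empty cell and then repeatedly calls list.remove; B collects empty-cell indices in one enumerate pass and drops the selected coordinates with a multiset-count dictionary in one keep-pass.
import Mathlib
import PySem

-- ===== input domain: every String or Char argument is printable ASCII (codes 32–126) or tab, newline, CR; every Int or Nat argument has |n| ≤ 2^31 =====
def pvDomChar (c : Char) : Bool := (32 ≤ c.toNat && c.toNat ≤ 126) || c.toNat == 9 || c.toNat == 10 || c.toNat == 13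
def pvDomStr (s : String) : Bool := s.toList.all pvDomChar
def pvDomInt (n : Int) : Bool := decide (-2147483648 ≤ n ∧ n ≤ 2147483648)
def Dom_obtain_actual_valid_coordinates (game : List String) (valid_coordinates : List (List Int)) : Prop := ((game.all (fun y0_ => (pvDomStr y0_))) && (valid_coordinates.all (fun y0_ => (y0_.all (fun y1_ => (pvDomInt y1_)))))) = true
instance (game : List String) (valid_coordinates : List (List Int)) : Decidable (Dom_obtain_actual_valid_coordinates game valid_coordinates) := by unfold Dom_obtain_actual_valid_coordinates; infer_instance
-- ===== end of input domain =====

-- B replaces A's repeated linear_search-and-mark while-loop by one enumerate pass and replaces the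
-- repeated list.remove loop by a multiset-count single keep-pass (objective: alternative).
-- Both Pythons mutate their arguments in place identically (game cells set to "R", valid_coordinates
-- rebuilt/shortened); the equivalence proved here is about the RETURN value.

-- ===== PORT A =====
-- linear_search: for i in range(0, len(array)): if array[i] == to_find: return i; return -1
def lsGo (array : List String) (to_find : String) (i : Nat) : Int :=
  if h : i < array.length then
    if array[i] = to_find then (i : Int) else lsGo array to_find (i + 1)
  else -1
termination_by array.length - i

def linear_search (array : List String) (to_find : String) : Int := lsGo array to_find 0

-- termination helpers for the while loop (cited by the port's decreasing_by)
theorem lsGo_spec (array : List String) (to_find : String) (i : Nat)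
    (h : lsGo array to_find i ≠ -1) :
    ∃ k : Nat, lsGo array to_find i = (k : Int) ∧ i ≤ k ∧ ∃ hk : k < array.length, array[k] = to_find := by
  fun_induction lsGo array to_find i with
  | case1 i hlt heq => exact ⟨i, rfl, le_refl i, hlt, heq⟩
  | case2 i hlt hne ih =>
    obtain ⟨k, hk1, hk2, hk3, hk4⟩ := ih h
    exact ⟨k, hk1, by omega, hk3, hk4⟩
  | case3 i hge => exact absurd rfl h

theorem count_set_lt (a : List String) (k : Nat) (hk : k < a.length) (hsp : a[k] = " ") :
    (a.set k "R").count " " < a.count " " := by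
  induction a generalizing k with
  | nil => simp at hk
  | cons x a ih =>
    cases k with
    | zero => simp_all
    | succ k =>
      simp only [List.set_cons_succ, List.count_cons]
      have := ih k (by simpa using hk) (by simpa using hsp)
      omega

-- A's while loop: find the first " ", record its index, overwrite it with "R", repeat
def ovcLoop (game : List String) (acc : List Int) : List Int :=
  let idx := linear_search game " "
  if hidx : idx = -1 then acc
  else ovcLoop (game.set idx.toNat "R") (acc ++ [idx])
termination_by game.count " "
decreasing_by
  obtain ⟨k, hk1, _, hklt, hksp⟩ := lsGo_spec game " " 0 hidx
  have h1 : linear_search game " " = (k : Int) := hk1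
  rw [h1, Int.toNat_natCast]; exact count_set_lt game k hklt hksp

def obtain_actual_valid_coordinates (game : List String) (valid_coordinates : List (List Int)) : List (List Int) × List (List Int) :=
  let available_spaces_indeces := ovcLoop game []
  let ultimate_val_coordinates :=
    available_spaces_indeces.foldl
      (fun acc index => acc ++ [(PySem.List.pyGet? valid_coordinates index).getD []]) []
  let vc' := ultimate_val_coordinates.foldl
      (fun l coordinate => (PySem.List.remove? l coordinate).getD l) valid_coordinates
  (ultimate_val_coordinates, vc')

-- ===== PORT B =====
-- one forward pass: indices of the cells equal to " " (the game[i] = "R" marking does not affect the return value)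
def altEmpties : List String → Nat → List Int
  | [], _ => []
  | c :: rest, i => if c = " " then (i : Int) :: altEmpties rest (i + 1) else altEmpties rest (i + 1)

-- pending: multiset of coordinates to drop, as a counting dict
def altPending (ult : List (List Int)) : PySem.Dict (List Int) Nat :=
  ult.foldl (fun d c => d.insert c (d.getD c 0 + 1)) PySem.Dict.empty

-- one keep-pass over valid_coordinates, decrementing pending
def altKeep : List (List Int) → PySem.Dict (List Int) Nat → List (List Int)
  | [], _ => []
  | c :: vc, d =>
    if d.getD c 0 > 0 then altKeep vc (d.insert c (d.getD c 0 - 1))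
    else c :: altKeep vc d

def obtain_actual_valid_coordinates_alt (game : List String) (valid_coordinates : List (List Int)) : List (List Int) × List (List Int) :=
  let empties := altEmpties game 0
  let ultimate_val_coordinates :=
    empties.map (fun i => (PySem.List.pyGet? valid_coordinates i).getD [])
  (ultimate_val_coordinates, altKeep valid_coordinates (altPending ultimate_val_coordinates))

-- ===== PRECONDITION & SPEC =====
-- Pre_ excludes exactly the inputs where Python A raises IndexError: some empty cell of game has an
-- index with no entry in valid_coordinates (B raises the same IndexError there).
def Pre_obtain_actual_valid_coordinates (game : List String) (valid_coordinates : List (List Int)) : Prop :=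
  ∀ p ∈ PySem.List.enumerate game 0, p.2 = " " → p.1 < (valid_coordinates.length : Int)
instance (game : List String) (valid_coordinates : List (List Int)) : Decidable (Pre_obtain_actual_valid_coordinates game valid_coordinates) := by unfold Pre_obtain_actual_valid_coordinates; infer_instance

def pvWitness_obtain_actual_valid_coordinates : List String × List (List Int) :=
  ([" ", "X", " "], [[0, 0], [0, 1], [0, 2], [1, 0]])

def Spec_obtain_actual_valid_coordinates (game : List String) (valid_coordinates : List (List Int)) (out : List (List Int) × List (List Int)) : Prop := out = obtain_actual_valid_coordinates_alt game valid_coordinates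
instance (game : List String) (valid_coordinates : List (List Int)) (out : List (List Int) × List (List Int)) : Decidable (Spec_obtain_actual_valid_coordinates game valid_coordinates out) := by unfold Spec_obtain_actual_valid_coordinates; infer_instance

-- ===== CLAIM (what is proved, stated in full; the proofs are below) =====
def Claim_equal_obtain_actual_valid_coordinates : Prop := ∀ (game : List String) (valid_coordinates : List (List Int)), Dom_obtain_actual_valid_coordinates game valid_coordinates → Pre_obtain_actual_valid_coordinates game valid_coordinates → Spec_obtain_actual_valid_coordinates game valid_coordinates (obtain_actual_valid_coordinates game valid_coordinates)

-- ===== LEMMAS AND PROOFS =====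

-- linear_search scans from index i: it returns the head of the empty-index list from i
theorem lsGo_eq_headD (a : List String) (i : Nat) :
    lsGo a " " i = (altEmpties (a.drop i) i).headD (-1) := by
  fun_induction lsGo a " " i with
  | case1 i hlt heq => rw [List.drop_eq_getElem_cons hlt]; simp [altEmpties, heq]
  | case2 i hlt hne ih =>
    rw [List.drop_eq_getElem_cons hlt]
    simp only [altEmpties, if_neg hne]
    exact ih
  | case3 i hge =>
    rw [List.drop_eq_nil_of_le (by omega)]
    simp [altEmpties]

theorem altEmpties_cons (a : List String) (i : Nat) (x : Int) (rest : List Int)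
    (h : altEmpties a i = x :: rest) :
    ∃ k : Nat, x = (k : Int) ∧ i ≤ k ∧ ∃ hk : k - i < a.length,
      a[k - i] = " " ∧ altEmpties (a.set (k - i) "R") i = rest := by
  induction a generalizing i x rest with
  | nil => simp [altEmpties] at h
  | cons c a ih =>
    by_cases hc : c = " "
    · rw [altEmpties, if_pos hc] at h
      obtain ⟨hx, hrest⟩ := List.cons.inj h
      refine ⟨i, hx.symm, le_refl i, by simp, by simpa using hc, ?_⟩
      simp only [Nat.sub_self, List.set_cons_zero]
      rw [altEmpties, if_neg (by decide)]
      exact hrest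
    · rw [altEmpties, if_neg hc] at h
      obtain ⟨k, hk1, hk2, hk3, hk4, hk5⟩ := ih (i + 1) x rest h
      have hki : k - i = (k - (i + 1)) + 1 := by omega
      refine ⟨k, hk1, by omega, by simp only [List.length_cons]; omega, ?_, ?_⟩
      · simp only [hki, List.getElem_cons_succ]; exact hk4
      · simp only [hki, List.set_cons_succ, altEmpties, if_neg hc]; exact hk5

theorem ovcLoop_eq (game : List String) (acc : List Int) :
    ovcLoop game acc = acc ++ altEmpties game 0 := by
  fun_induction ovcLoop game acc with
  | case1 game acc idx hidx =>
    cases he : altEmpties game 0 with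
    | nil => simp
    | cons x rest =>
      obtain ⟨k, hk1, -, -, -, -⟩ := altEmpties_cons game 0 x rest he
      have hls : linear_search game " " = (k : Int) := by
        rw [linear_search, lsGo_eq_headD, List.drop_zero, he, hk1]; rfl
      have hcon : (k : Int) = -1 := by rw [← hls]; exact hidx
      omega
  | case2 game acc idx hidx ih =>
    cases he : altEmpties game 0 with
    | nil =>
      have : linear_search game " " = -1 := by
        rw [linear_search, lsGo_eq_headD, List.drop_zero, he]; rfl
      exact absurd this hidx
    | cons x rest =>
      obtain ⟨k, hk1, -, hk3, hk4, hk5⟩ := altEmpties_cons game 0 x rest he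
      have hls : linear_search game " " = (k : Int) := by
        rw [linear_search, lsGo_eq_headD, List.drop_zero, he, hk1]; rfl
      have hidxk : idx = (k : Int) := hls
      rw [hidxk] at ih ⊢
      simp only [Int.toNat_natCast] at ih ⊢
      rw [show k - 0 = k from rfl] at hk5
      rw [ih, hk5, hk1]
      simp

-- the selected coordinates form a sublist of valid_coordinates
theorem map_get_altEmpties_sublist (a : List String) (i : Nat) (vc : List (List Int))
    (hpre : ∀ k : Nat, (h : k < a.length) → a[k] = " " → i + k < vc.length) :
    ((altEmpties a i).map (fun j => (PySem.List.pyGet? vc j).getD [])).Sublist (vc.drop i) := by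
  induction a generalizing i with
  | nil => simp [altEmpties]
  | cons c a ih =>
    have hnext : ∀ k : Nat, (h : k < a.length) → a[k] = " " → (i + 1) + k < vc.length := by
      intro k hk hsp
      have := hpre (k + 1) (by simp only [List.length_cons]; omega)
        (by simpa using hsp)
      omega
    by_cases hc : c = " "
    · have hi : i < vc.length := by have := hpre 0 (by simp) (by simpa using hc); omega
      simp only [altEmpties, if_pos hc, List.map_cons]
      rw [List.drop_eq_getElem_cons hi]
      have hhead : (PySem.List.pyGet? vc ((i : Nat) : Int)).getD [] = vc[i] := by
        rw [PySem.List.pyGet?_natCast, List.getElem?_eq_getElem hi]; rfl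
      rw [hhead]
      exact List.Sublist.cons₂ _ (ih (i + 1) hnext)
    · simp only [altEmpties, if_neg hc]
      refine (ih (i + 1) hnext).trans ?_
      have : vc.drop (i + 1) = (vc.drop i).drop 1 := by rw [List.drop_drop]
      rw [this]
      exact List.drop_sublist 1 (vc.drop i)

-- proof-side functional version of the keep-pass
def rmc : List (List Int) → (List Int → Nat) → List (List Int)
  | [], _ => []
  | c :: vc, f => if f c > 0 then rmc vc (fun v => if v = c then f c - 1 else f v) else c :: rmc vc f

theorem altKeep_eq_rmc (vc : List (List Int)) (d : PySem.Dict (List Int) Nat) :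
    altKeep vc d = rmc vc (fun v => d.getD v 0) := by
  induction vc generalizing d with
  | nil => simp [altKeep, rmc]
  | cons c vc ih =>
    simp only [altKeep, rmc]
    by_cases hd : d.getD c 0 > 0
    · rw [if_pos hd, if_pos hd, ih]
      congr 1
      funext v
      rw [PySem.Dict.getD_insert]
    · rw [if_neg hd, if_neg hd, ih]

theorem altPending_getD (ult : List (List Int)) (v : List Int) :
    (altPending ult).getD v 0 = ult.count v := by
  have gen : ∀ (us : List (List Int)) (d : PySem.Dict (List Int) Nat),
      (us.foldl (fun d c => d.insert c (d.getD c 0 + 1)) d).getD v 0 = d.getD v 0 + us.count v := by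
    intro us
    induction us with
    | nil => simp
    | cons c us ih =>
      intro d
      simp only [List.foldl_cons, ih, PySem.Dict.getD_insert, List.count_cons]
      by_cases hv : v = c <;> simp [hv, beq_iff_eq]
      · omega
      · intro h; exact absurd h.symm hv
  simpa using gen ult PySem.Dict.empty

theorem rmc_zero (vc : List (List Int)) : rmc vc (fun _ => 0) = vc := by
  induction vc with
  | nil => rfl
  | cons c vc ih => simpa [rmc] using ih

theorem rmc_erase (vc : List (List Int)) (u : List Int) (g : List Int → Nat) (hu : u ∈ vc) :
    rmc vc (fun v => g v + if v = u then 1 else 0) = rmc (vc.erase u) g := by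
  induction vc generalizing g with
  | nil => simp at hu
  | cons c vc ih =>
    by_cases hcu : c = u
    · subst hcu
      simp only [rmc]
      rw [if_pos (by simp), List.erase_cons_head]
      congr 1
      funext v
      by_cases hv : v = c <;> simp [hv]
    · have hu' : u ∈ vc := by
        rcases List.mem_cons.mp hu with h | h
        · exact absurd h.symm hcu
        · exact h
      have herase : (c :: vc).erase u = c :: vc.erase u :=
        List.erase_cons_tail (by simp [hcu])
      rw [herase]
      simp only [rmc]
      have hfc : g c + (if c = u then 1 else 0) = g c := by simp [hcu]
      by_cases hg : g c > 0
      · rw [if_pos (by rw [hfc]; exact hg), if_pos hg]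
        rw [← ih (fun v => if v = c then g c - 1 else g v) hu']
        congr 1
        funext v
        by_cases hv : v = c
        · subst hv; simp [hcu]
        · simp [hv]
      · rw [if_neg (by rw [hfc]; exact hg), if_neg hg]
        rw [ih g hu']

theorem foldl_remove_eq_rmc (us vc : List (List Int)) (h : ∀ v, us.count v ≤ vc.count v) :
    us.foldl (fun l c => (PySem.List.remove? l c).getD l) vc = rmc vc (fun v => us.count v) := by
  induction us generalizing vc with
  | nil => simpa using (rmc_zero vc).symm
  | cons u us ih =>
    have hmem : u ∈ vc := by
      have h1 := h u
      rw [List.count_cons_self] at h1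
      exact List.count_pos_iff.mp (by omega)
    simp only [List.foldl_cons]
    rw [PySem.List.remove?_eq_some_erase vc u hmem, Option.getD_some]
    rw [ih (vc.erase u) ?hdom]
    case hdom =>
      intro v
      by_cases hv : v = u
      · subst hv
        have h1 := h v
        rw [List.count_cons_self] at h1
        rw [List.count_erase_self]
        omega
      · rw [List.count_erase_of_ne hv]
        have h1 := h v
        simp only [List.count_cons] at h1
        omega
    rw [← rmc_erase vc u (fun v => us.count v) hmem]
    congr 1
    funext v
    simp only [List.count_cons]
    by_cases hv : v = u
    · subst hv; simp
    · simp [beq_iff_eq, hv, Ne.symm hv]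

-- ===== VERDICT (by name: the statement is the Claim_ definition above) =====
theorem obtain_actual_valid_coordinates_spec : Claim_equal_obtain_actual_valid_coordinates := by
  intro game vc _ hpre
  have hpre' : ∀ k : Nat, (h : k < game.length) → game[k] = " " → 0 + k < vc.length := by
    intro k hk hsp
    have hm : ((k : Int), game[k]) ∈ PySem.List.enumerate game 0 := by
      rw [PySem.List.mem_enumerate_iff]
      exact ⟨k, hk, by simp⟩
    have := hpre _ hm hsp
    have : (k : Int) < (vc.length : Int) := this
    omega
  show _ = _
  unfold obtain_actual_valid_coordinates obtain_actual_valid_coordinates_alt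
  simp only [ovcLoop_eq game [], List.nil_append,
    PySem.List.foldl_append_singleton_eq_map (fun index => (PySem.List.pyGet? vc index).getD []) (altEmpties game 0) []]
  have hsub := map_get_altEmpties_sublist game 0 vc hpre'
  rw [List.drop_zero] at hsub
  have hcnt : ∀ v, ((altEmpties game 0).map (fun j => (PySem.List.pyGet? vc j).getD [])).count v ≤ vc.count v :=
    fun v => hsub.count_le v
  rw [altKeep_eq_rmc, foldl_remove_eq_rmc _ vc hcnt]
  simp only [altPending_getD]
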